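-- pv_equiv track=rewrite | github.com/frostburn/hewmp | src/hewmp/chord_parser.py | separate_by_arrows
-- ===== SOURCE A (Python) =====
-- ARROWS = "+-><^vunUDAVMWi!*%"
--
-- def separate_by_arrows(token):
--     separated = []
--     current_arrow_token = ""
--     for character in token:
--         if character in ARROWS:
--             separated.append(current_arrow_token)
--             current_arrow_token = ""
--         current_arrow_token += character
--     separated.append(current_arrow_token)
--     return separated
-- ===== SOURCE B (Python) =====
-- ARROWS = "+-><^vunUDAVMWi!*%"
--
-- def separate_by_arrows(token):
--     # Build the segment list back-to-front: walk the token right-to-left,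
--     # growing the current head segment and opening a new one after each arrow.
--     segments = [""]
--     for character in reversed(token):
--         segments[0] = character + segments[0]
--         if character in ARROWS:
--             segments.insert(0, "")
--     return segments
-- ===== Notes on version B (the rewrite author's own statement) =====
-- stated objective: alternative
-- what changed: B builds the segment list back-to-front in a single right-to-left pass, prepending each character to the head segment and opening a new empty segment after each arrow, instead of A's forward accumulator that appends-and-resets a current string.
import Mathlib
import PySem

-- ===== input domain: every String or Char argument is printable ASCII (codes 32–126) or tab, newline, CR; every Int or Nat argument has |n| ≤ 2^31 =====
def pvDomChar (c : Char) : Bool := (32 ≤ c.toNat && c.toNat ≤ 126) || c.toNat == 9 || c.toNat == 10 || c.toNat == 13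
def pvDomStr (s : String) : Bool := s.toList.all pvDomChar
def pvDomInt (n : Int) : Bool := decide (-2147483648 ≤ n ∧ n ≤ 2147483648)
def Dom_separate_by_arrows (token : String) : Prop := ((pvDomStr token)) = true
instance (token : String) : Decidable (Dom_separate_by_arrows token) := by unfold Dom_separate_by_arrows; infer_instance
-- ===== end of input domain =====

-- B builds the segment list back-to-front in one right-to-left pass instead of A's
-- forward accumulator with append-and-reset; same O(n) cost, different decomposition.

-- ARROWS = "+-><^vunUDAVMWi!*%" (shared module constant), as a char list
def pvArrows : List Char := "+-><^vunUDAVMWi!*%".toList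

-- ===== PORT A =====
-- loop body of A: on an arrow, flush current_arrow_token and reset; then cur += character
def pvAStep (st : List (List Char) × List Char) (character : Char) : List (List Char) × List Char :=
  let st := if character ∈ pvArrows then (st.1 ++ [st.2], ([] : List Char)) else st
  (st.1, st.2 ++ [character])

def separate_by_arrows (token : String) : List String :=
  let st := token.toList.foldl pvAStep ([], [])
  (st.1 ++ [st.2]).map String.ofList

-- ===== PORT B =====
-- loop body of B (right-to-left): prepend character to head segment, then open a new
-- empty segment in front if the character is an arrow
def pvBStep (character : Char) (segments : List (List Char)) : List (List Char) :=
  let segments := match segments with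
    | [] => [[character]]   -- unreachable: segments starts at [""] and never empties
    | h :: t => (character :: h) :: t
  if character ∈ pvArrows then [] :: segments else segments

def separate_by_arrows_alt (token : String) : List String :=
  (token.toList.foldr pvBStep [[]]).map String.ofList

-- ===== PRECONDITION & SPEC =====
def Spec_separate_by_arrows (token : String) (out : List String) : Prop := out = separate_by_arrows_alt token
instance (token : String) (out : List String) : Decidable (Spec_separate_by_arrows token out) := by unfold Spec_separate_by_arrows; infer_instance

-- ===== CLAIM (what is proved, stated in full; the proofs are below) =====
def Claim_equal_separate_by_arrows : Prop := ∀ (token : String), Dom_separate_by_arrows token → Spec_separate_by_arrows token (separate_by_arrows token)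

-- ===== LEMMAS AND PROOFS =====

theorem pvB_ne_nil (l : List Char) : l.foldr pvBStep [[]] ≠ [] := by
  induction l with
  | nil => simp
  | cons c l ih =>
    simp only [List.foldr]
    cases h : l.foldr pvBStep [[]] with
    | nil => exact absurd h ih
    | cons a t =>
      unfold pvBStep
      by_cases hc : c ∈ pvArrows <;> simp [hc]

-- loop invariant: A's fold, started from (sep, cur), flushes to
-- sep ++ (cur ++ head of B's fold) :: tail of B's fold
theorem pv_key (l : List Char) : ∀ (sep : List (List Char)) (cur : List Char),
    (l.foldl pvAStep (sep, cur)).1 ++ [(l.foldl pvAStep (sep, cur)).2]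
      = sep ++ (cur ++ (l.foldr pvBStep [[]]).headI) :: (l.foldr pvBStep [[]]).tail := by
  induction l with
  | nil => intro sep cur; simp
  | cons c l ih =>
    intro sep cur
    have hne := pvB_ne_nil l
    cases hB : l.foldr pvBStep [[]] with
    | nil => exact absurd hB hne
    | cons h t =>
      by_cases hc : c ∈ pvArrows
      · have : l.foldl pvAStep (pvAStep (sep, cur) c) =
            l.foldl pvAStep (sep ++ [cur], [c]) := by
          simp [pvAStep, hc]
        simp only [List.foldl, this, ih (sep ++ [cur]) [c], List.foldr,
          pvBStep, hB, hc, if_pos]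
        simp
      · have : l.foldl pvAStep (pvAStep (sep, cur) c) =
            l.foldl pvAStep (sep, cur ++ [c]) := by
          simp [pvAStep, hc]
        simp only [List.foldl, this, ih sep (cur ++ [c]), List.foldr,
          pvBStep, hB, hc, ite_false]
        simp

theorem pv_eq (token : String) : separate_by_arrows token = separate_by_arrows_alt token := by
  unfold separate_by_arrows separate_by_arrows_alt
  have h := pv_key token.toList [] []
  cases hB : token.toList.foldr pvBStep [[]] with
  | nil => exact absurd hB (pvB_ne_nil token.toList)
  | cons a t => simp only [hB] at h ⊢; simp at h; simp [h]

-- ===== VERDICT (by name: the statement is the Claim_ definition above) =====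
theorem separate_by_arrows_spec : Claim_equal_separate_by_arrows := by
  intro token _
  unfold Spec_separate_by_arrows
  exact pv_eq token
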